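-- pv_equiv track=rewrite | github.com/yuanfu-bio/FBcount | scripts/count_UMI.py | correct_umi
-- ===== SOURCE A (Python) =====
-- def is_below_hamming_threshold(str1, str2, threshold):
--     distance = 0
--     for ch1, ch2 in zip(str1, str2):
--         if ch1 != ch2:
--             distance += 1
--             if distance > threshold:
--                 return 0
--     return 1
--
-- def correct_umi(umi_count):
--     MAXDIST_CORRECT_umi = 1
--     umi_correct_mapping = {}
--     keys_sorted, values_sorted = zip(*sorted(umi_count.items(), key=lambda item: item[1], reverse=False))
--     keys_sorted_rev, values_sorted_rev = zip(*sorted(umi_count.items(), key=lambda item: item[1], reverse=True))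
--     umi_raw_kinds = len(keys_sorted)
--     min_count_ten_mul = values_sorted[0]*10
--
--     for idx in range(umi_raw_kinds):
--         raw_umi = keys_sorted_rev[idx]
--         mul_low = values_sorted_rev[idx]//10
--         for i in range(umi_raw_kinds):
--             less_umi = keys_sorted[i]
--             if less_umi not in umi_correct_mapping:
--                 if values_sorted[i] <= mul_low:
--                     if is_below_hamming_threshold(keys_sorted[i], raw_umi, MAXDIST_CORRECT_umi):
--                         umi_correct_mapping[less_umi] = raw_umi
--                 else:
--                     break
--     return umi_correct_mapping
-- ===== SOURCE B (Python) =====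
-- def _within_one(s, t):
--     # at most one mismatch among the first min(len(s), len(t)) characters
--     seen = False
--     for a, b in zip(s, t):
--         if a != b:
--             if seen:
--                 return False
--             seen = True
--     return True
--
-- def _first_target(less, lc, raws):
--     # index of the first raw (highest count first) that may absorb `less`
--     for j, (raw, rc) in enumerate(raws):
--         if rc // 10 < lc:
--             return None
--         if _within_one(less, raw):
--             return j
--     return None
--
-- def correct_umi(umi_count):
--     items = sorted(umi_count.items(), key=lambda kv: kv[1])
--     raws = sorted(umi_count.items(), key=lambda kv: kv[1], reverse=True)
--     buckets = {}
--     for less, lc in items: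
--         j = _first_target(less, lc, raws)
--         if j is not None:
--             buckets.setdefault(j, []).append(less)
--     out = {}
--     for j, (raw, rc) in enumerate(raws):
--         for less in buckets.get(j, []):
--             out[less] = raw
--     return out
-- ===== Notes on version B (the rewrite author's own statement) =====
-- stated objective: alternative
-- what changed: A sweeps raws from highest count down, mutating one shared mapping and re-scanning all still-unmapped low-count UMIs per raw; B instead computes, independently for each UMI, the first raw (highest count first, with an early cutoff at count//10 < its count) within Hamming distance 1 of it, groups the results into per-raw buckets, and emits the buckets in raw order, so no shared mutable mapping or skip-the-mapped rescans remain.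
import Mathlib
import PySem

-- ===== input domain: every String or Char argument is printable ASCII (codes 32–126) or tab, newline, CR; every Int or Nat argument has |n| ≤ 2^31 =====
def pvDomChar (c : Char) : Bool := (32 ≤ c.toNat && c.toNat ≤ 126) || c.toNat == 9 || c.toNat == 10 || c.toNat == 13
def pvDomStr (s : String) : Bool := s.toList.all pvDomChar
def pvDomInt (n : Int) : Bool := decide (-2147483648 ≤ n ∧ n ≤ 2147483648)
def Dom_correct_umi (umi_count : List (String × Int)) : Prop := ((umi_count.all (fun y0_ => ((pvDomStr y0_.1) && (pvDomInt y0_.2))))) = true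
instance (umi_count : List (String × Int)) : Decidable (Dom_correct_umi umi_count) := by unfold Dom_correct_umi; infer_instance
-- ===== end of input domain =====

-- B replaces A's quadratic "claim every still-unmapped low UMI" sweep by an independent
-- first-matching-raw search per UMI plus bucket grouping (objective: alternative structure).

-- ===== PORT A =====
-- is_below_hamming_threshold: loop over zip(str1, str2) with early 'return 0'
def pvHamChk (threshold : Int) : List (Char × Char) → Int → Int
  | [], _ => 1
  | (c1, c2) :: rest, d =>
    if c1 ≠ c2 then
      if d + 1 > threshold then 0 else pvHamChk threshold rest (d + 1)
    else pvHamChk threshold rest d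

def is_below_hamming_threshold (str1 str2 : String) (threshold : Int) : Int :=
  pvHamChk threshold (str1.toList.zip str2.toList) 0

-- A's inner 'for i in range(umi_raw_kinds)' loop, with its break
def pvInnerA (raw_umi : String) (mul_low : Int) :
    List (String × Int) → PySem.Dict String String → PySem.Dict String String
  | [], m => m
  | (less_umi, v) :: rest, m =>
    if m.contains less_umi then pvInnerA raw_umi mul_low rest m
    else if v ≤ mul_low then
      if is_below_hamming_threshold less_umi raw_umi 1 ≠ 0 then
        pvInnerA raw_umi mul_low rest (m.insert less_umi raw_umi)
      else pvInnerA raw_umi mul_low rest m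
    else m  -- break

def correct_umi (umi_count : List (String × Int)) : List (String × String) :=
  let keys_sorted := PySem.List.sorted umi_count (fun kv => kv.2) false
  let keys_sorted_rev := PySem.List.sorted umi_count (fun kv => kv.2) true
  -- min_count_ten_mul = values_sorted[0]*10 (computed by A, never used afterwards)
  let _min_count_ten_mul := (keys_sorted.getD 0 default).2 * 10
  (keys_sorted_rev.foldl
      (fun m rp => pvInnerA rp.1 (PySem.Int.floordiv rp.2 10) keys_sorted m)
      PySem.Dict.empty).items

-- ===== PORT B =====
-- _within_one: at most one mismatch over zip(s, t)
def pvWithinOne : List (Char × Char) → Bool → Bool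
  | [], _ => true
  | (a, b) :: rest, seen =>
    if a ≠ b then (if seen then false else pvWithinOne rest true)
    else pvWithinOne rest seen

def within_one (s t : String) : Bool := pvWithinOne (s.toList.zip t.toList) false

-- _first_target: scan raws (highest count first) with its two early returns;
-- j is the running enumerate counter (a Python int that stays ≥ 0, ported as Nat)
def pvFirstTarget (less : String) (lc : Int) : Nat → List (String × Int) → Option Nat
  | _, [] => none
  | j, (raw, rc) :: rest =>
    if PySem.Int.floordiv rc 10 < lc then none
    else if within_one less raw then some j
    else pvFirstTarget less lc (j + 1) rest

def correct_umi_alt (umi_count : List (String × Int)) : List (String × String) :=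
  let items := PySem.List.sorted umi_count (fun kv => kv.2) false
  let raws := PySem.List.sorted umi_count (fun kv => kv.2) true
  let buckets : PySem.Dict Nat (List String) :=
    items.foldl (fun b q =>
      match pvFirstTarget q.1 q.2 0 raws with
      | some j => b.modify j [] (fun l => l ++ [q.1])
      | none => b) PySem.Dict.empty
  -- 'for j, (raw, rc) in enumerate(raws)': zipIdx carries the same Nat counter
  let out : PySem.Dict String String :=
    (raws.zipIdx).foldl (fun o p =>
      (buckets.getD p.2 []).foldl (fun o less => o.insert less p.1.1) o) PySem.Dict.empty
  out.items

-- ===== PRECONDITION & SPEC =====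
-- The argument stands for a Python dict, so its keys are distinct; A raises ValueError
-- on the empty dict (unpacking zip(*[])), so the empty list is excluded as well.
def Pre_correct_umi (umi_count : List (String × Int)) : Prop :=
  umi_count ≠ [] ∧ (umi_count.map (fun kv => kv.1)).Nodup
instance (umi_count : List (String × Int)) : Decidable (Pre_correct_umi umi_count) := by
  unfold Pre_correct_umi; infer_instance
def pvWitness_correct_umi : (List (String × Int)) := [("AA", 20), ("AB", 2)]

def Spec_correct_umi (umi_count : List (String × Int)) (out : List (String × String)) : Prop :=
  out = correct_umi_alt umi_count
instance (umi_count : List (String × Int)) (out : List (String × String)) :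
    Decidable (Spec_correct_umi umi_count out) := by unfold Spec_correct_umi; infer_instance

-- ===== CLAIM (what is proved, stated in full; the proofs are below) =====
def Claim_equal_correct_umi : Prop := ∀ (umi_count : List (String × Int)),
  Dom_correct_umi umi_count → Pre_correct_umi umi_count →
    Spec_correct_umi umi_count (correct_umi umi_count)

-- ===== LEMMAS AND PROOFS =====

-- spec-side abbreviations for the two sorted views and the matching relation
def pvKs (u : List (String × Int)) : List (String × Int) :=
  PySem.List.sorted u (fun kv => kv.2) false
def pvRs (u : List (String × Int)) : List (String × Int) :=
  PySem.List.sorted u (fun kv => kv.2) true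
def pvCond (q r : String × Int) : Bool :=
  decide (q.2 ≤ PySem.Int.floordiv r.2 10) && within_one q.1 r.1
def pvF (u : List (String × Int)) (q : String × Int) : Option Nat :=
  List.findIdx? (fun r => pvCond q r) (pvRs u)
def pvGroup (u : List (String × Int)) (j : Nat) : List (String × String) :=
  ((pvKs u).filter (fun q => pvF u q == some j)).map
    (fun q => (q.1, ((pvRs u).getD j default).1))
-- A's inner-loop body, break removed (legitimate only under the ascending sort)
def pvStep (raw : String) (mulLow : Int) (m : PySem.Dict String String) (q : String × Int) :
    PySem.Dict String String :=
  if m.contains q.1 = false ∧ q.2 ≤ mulLow ∧ within_one q.1 raw = true then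
    m.insert q.1 raw else m

theorem pvHamChk_iff (l : List (Char × Char)) :
    (pvHamChk 1 l 0 ≠ 0 ↔ pvWithinOne l false = true) ∧
    (pvHamChk 1 l 1 ≠ 0 ↔ pvWithinOne l true = true) := by
  induction l with
  | nil => simp [pvHamChk, pvWithinOne]
  | cons hd tl ih =>
    obtain ⟨c1, c2⟩ := hd
    by_cases h : c1 = c2 <;>
      simp [pvHamChk, pvWithinOne, h, ih.1, ih.2]

theorem pvWithin_eq (s t : String) :
    (is_below_hamming_threshold s t 1 ≠ 0) ↔ within_one s t = true := by
  simpa [is_below_hamming_threshold, within_one] using (pvHamChk_iff (s.toList.zip t.toList)).1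

theorem pvNoElig (raw : String) (mulLow : Int) (l : List (String × Int))
    (h : ∀ q ∈ l, ¬ q.2 ≤ mulLow) (m : PySem.Dict String String) :
    l.foldl (pvStep raw mulLow) m = m := by
  induction l generalizing m with
  | nil => rfl
  | cons hd tl ih =>
    have hstep : pvStep raw mulLow m hd = m := by
      simp only [pvStep]; rw [if_neg]; intro hcon; exact h hd (by simp) hcon.2.1
    rw [List.foldl_cons, hstep]
    exact ih (fun q hq => h q (by simp [hq])) m

theorem pvInnerA_eq (raw : String) (mulLow : Int) (l : List (String × Int))
    (hasc : l.Pairwise (fun a b => a.2 ≤ b.2)) (m : PySem.Dict String String) :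
    pvInnerA raw mulLow l m = l.foldl (pvStep raw mulLow) m := by
  induction l generalizing m with
  | nil => rfl
  | cons hd tl ih =>
    obtain ⟨less, v⟩ := hd
    have hrest := (List.pairwise_cons.mp hasc).2
    have hall := (List.pairwise_cons.mp hasc).1
    by_cases hc : m.contains less
    · have : pvStep raw mulLow m (less, v) = m := by
        simp [pvStep, hc]
      simp only [pvInnerA, if_pos hc, List.foldl_cons, this]
      exact ih hrest m
    · by_cases hv : v ≤ mulLow
      · by_cases hh : is_below_hamming_threshold less raw 1 ≠ 0
        · have hw : within_one less raw = true := (pvWithin_eq less raw).mp hh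
          have : pvStep raw mulLow m (less, v) = m.insert less raw := by
            simp [pvStep, hc, hv, hw]
          simp only [pvInnerA, if_neg hc, if_pos hv, if_pos hh, List.foldl_cons, this]
          exact ih hrest (m.insert less raw)
        · have hw : ¬ within_one less raw = true := fun hwt => hh ((pvWithin_eq less raw).mpr hwt)
          have : pvStep raw mulLow m (less, v) = m := by
            simp only [pvStep]; rw [if_neg (by tauto)]
          simp only [pvInnerA, if_neg hc, if_pos hv, if_neg hh, List.foldl_cons, this]
          exact ih hrest m
      · have : pvStep raw mulLow m (less, v) = m := by
          simp only [pvStep]; rw [if_neg (by tauto)]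
        simp only [pvInnerA, if_neg hc, if_neg hv, List.foldl_cons, this]
        exact (pvNoElig raw mulLow tl
          (fun q hq => fun hle => hv (le_trans (hall q hq) hle)) m).symm

theorem pvStepItems (raw : String) (mulLow : Int) (l : List (String × Int))
    (hn : (l.map (fun q => q.1)).Nodup) (m : PySem.Dict String String) :
    (l.foldl (pvStep raw mulLow) m).items
      = m.items ++ (l.filter
          (fun q => !m.contains q.1 && (decide (q.2 ≤ mulLow) && within_one q.1 raw))).map
            (fun q => (q.1, raw)) := by
  induction l generalizing m with
  | nil => simp
  | cons hd tl ih =>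
    have hn' : (tl.map (fun q => q.1)).Nodup := (List.nodup_cons.mp hn).2
    have hhd : hd.1 ∉ tl.map (fun q => q.1) := (List.nodup_cons.mp hn).1
    by_cases hc : m.contains hd.1
    · have hstep : pvStep raw mulLow m hd = m := by simp [pvStep, hc]
      simp only [List.foldl_cons, hstep, List.filter_cons]
      rw [if_neg (by simp [hc])]
      exact ih hn' m
    · by_cases hrest : hd.2 ≤ mulLow ∧ within_one hd.1 raw = true
      · have hstep : pvStep raw mulLow m hd = m.insert hd.1 raw := by
          simp [pvStep, hc, hrest.1, hrest.2]
        have hins : (m.insert hd.1 raw).items = m.items ++ [(hd.1, raw)] :=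
          PySem.Dict.items_insert_of_not_contains m raw (by simpa using hc)
        simp only [List.foldl_cons, hstep, List.filter_cons]
        rw [if_pos (by simp [hc, hrest.1, hrest.2])]
        rw [ih hn' (m.insert hd.1 raw), hins]
        have hfil : tl.filter
            (fun q => !(m.insert hd.1 raw).contains q.1 && (decide (q.2 ≤ mulLow) && within_one q.1 raw))
            = tl.filter (fun q => !m.contains q.1 && (decide (q.2 ≤ mulLow) && within_one q.1 raw)) := by
          apply List.filter_congr
          intro q hq
          have hne : q.1 ≠ hd.1 := by
            intro he
            exact hhd (by simpa [he.symm] using List.mem_map_of_mem hq (f := fun q => q.1))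
          rw [PySem.Dict.contains_insert]
          have hb : (q.1 == hd.1) = false := beq_eq_false_iff_ne.mpr hne
          rw [hb]
          simp
        rw [hfil]
        simp
      · have hstep : pvStep raw mulLow m hd = m := by
          simp only [pvStep]; rw [if_neg (by tauto)]
        simp only [List.foldl_cons, hstep, List.filter_cons]
        rw [if_neg (by
          simp only [Bool.and_eq_true, Bool.not_eq_true', decide_eq_true_eq]
          tauto)]
        exact ih hn' m

theorem pvCond_false_of_lt (q r : String × Int) (h : PySem.Int.floordiv r.2 10 < q.2) :
    pvCond q r = false := by
  unfold pvCond
  rw [decide_eq_false (not_le.mpr h), Bool.false_and]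

theorem pvCond_head (q r : String × Int) (h : ¬ PySem.Int.floordiv r.2 10 < q.2) :
    pvCond q r = within_one q.1 r.1 := by
  unfold pvCond
  rw [decide_eq_true (le_of_not_gt h), Bool.true_and]

theorem pvFirstTarget_eq (less : String) (lc : Int) (l : List (String × Int))
    (hdesc : l.Pairwise (fun a b => b.2 ≤ a.2)) (j : Nat) :
    pvFirstTarget less lc j l
      = (List.findIdx? (fun r => pvCond (less, lc) r) l).map (fun i => j + i) := by
  induction l generalizing j with
  | nil => rfl
  | cons hd tl ih =>
    obtain ⟨raw, rc⟩ := hd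
    have hall := (List.pairwise_cons.mp hdesc).1
    have hrest := (List.pairwise_cons.mp hdesc).2
    by_cases hb : PySem.Int.floordiv rc 10 < lc
    · have hnone : List.findIdx? (fun r => pvCond (less, lc) r) ((raw, rc) :: tl) = none := by
        rw [List.findIdx?_eq_none_iff]
        intro r hr
        rcases List.mem_cons.mp hr with he | hm
        · rw [he]; exact pvCond_false_of_lt (less, lc) (raw, rc) hb
        · have hle : r.2 ≤ rc := hall r hm
          have h1 : r.2 < lc * 10 :=
            lt_of_le_of_lt hle ((PySem.Int.floordiv_lt_iff_lt_mul (by norm_num)).mp hb)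
          exact pvCond_false_of_lt (less, lc) r
            ((PySem.Int.floordiv_lt_iff_lt_mul (by norm_num)).mpr h1)
      rw [hnone]
      simp only [pvFirstTarget, if_pos hb, Option.map_none]
    · by_cases hw : within_one less raw = true
      · have hcond : pvCond (less, lc) (raw, rc) = true := by
          rw [pvCond_head (less, lc) (raw, rc) hb]; exact hw
        rw [List.findIdx?_cons]
        simp only [pvFirstTarget, if_neg hb, if_pos hw, hcond, if_true, Option.map_some]
        simp
      · have hcond : pvCond (less, lc) (raw, rc) = false := by
          rw [pvCond_head (less, lc) (raw, rc) hb, ← Bool.not_eq_true]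
          exact hw
        rw [List.findIdx?_cons]
        simp only [pvFirstTarget, if_neg hb, if_neg hw, hcond, Bool.false_eq_true, if_false,
          Option.map_map]
        rw [ih hrest (j + 1)]
        congr 1
        funext i
        simp only [Function.comp_apply]
        omega

theorem pvBucketFold (l : List (String × Int)) (F : String × Int → Option Nat)
    (init : PySem.Dict Nat (List String)) :
    l.foldl (fun b q =>
        ((F q).map (fun (j : Nat) => b.modify j [] (fun s => s ++ [q.1]))).getD b) init
      = (l.filterMap (fun q => (F q).map (fun i => (i, q.1)))).foldl
          (fun b pr => b.modify pr.1 [] (fun s => s ++ [pr.2])) init := by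
  induction l generalizing init with
  | nil => rfl
  | cons hd tl ih =>
    cases hF : F hd with
    | none =>
      simp only [List.foldl_cons, List.filterMap_cons, hF, Option.map_none, Option.getD_none]
      exact ih init
    | some i =>
      simp only [List.foldl_cons, List.filterMap_cons, hF, Option.map_some, Option.getD_some]
      exact ih _

theorem pvBucketChar (l : List (String × Int)) (F : String × Int → Option Nat) (j : Nat) :
    ((l.filterMap (fun q => (F q).map (fun i => (i, q.1)))).filter
        (fun p => p.1 == j)).map (fun p => p.2)
      = (l.filter (fun q => F q == some j)).map (fun q => q.1) := by
  induction l with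
  | nil => rfl
  | cons hd tl ih =>
    cases hF : F hd with
    | none => simp [List.filterMap_cons, hF, List.filter_cons, ih]
    | some i =>
      by_cases hij : i = j
      · simp [List.filterMap_cons, hF, List.filter_cons, hij, ih]
      · simp [List.filterMap_cons, hF, List.filter_cons, hij, ih]

theorem pvInjKey (u : List (String × Int)) (hn : ((pvKs u).map (fun q => q.1)).Nodup)
    {q q' : String × Int} (hq : q ∈ pvKs u) (hq' : q' ∈ pvKs u) (he : q.1 = q'.1) : q = q' :=
  List.inj_on_of_nodup_map hn hq hq' he

theorem pvMemFlat (u : List (String × Int)) (hn : ((pvKs u).map (fun q => q.1)).Nodup)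
    (q : String × Int) (hq : q ∈ pvKs u) (p : Nat) :
    (((List.range p).flatMap (pvGroup u)).any (fun pr => pr.1 == q.1) = true)
      ↔ ∃ j, j < p ∧ pvF u q = some j := by
  constructor
  · intro h
    obtain ⟨pr, hpr, heq⟩ := List.any_eq_true.mp h
    obtain ⟨j, hj, hmem⟩ := List.mem_flatMap.mp hpr
    obtain ⟨q', hq', hq'e⟩ := List.mem_map.mp hmem
    have hq'ks : q' ∈ pvKs u := List.mem_of_mem_filter hq'
    have hF' : pvF u q' = some j := by simpa using (List.mem_filter.mp hq').2
    have : q'.1 = q.1 := by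
      have : pr.1 = q.1 := by simpa using heq
      rw [← this, ← hq'e]
    have : q' = q := pvInjKey u hn hq'ks hq this
    exact ⟨j, List.mem_range.mp hj, by rw [← this]; exact hF'⟩
  · rintro ⟨j, hj, hF⟩
    apply List.any_eq_true.mpr
    refine ⟨(q.1, ((pvRs u).getD j default).1), ?_, by simp⟩
    apply List.mem_flatMap.mpr
    refine ⟨j, List.mem_range.mpr hj, ?_⟩
    apply List.mem_map.mpr
    exact ⟨q, List.mem_filter.mpr ⟨hq, by simp [hF]⟩, rfl⟩

-- first-hit characterisation: unclaimed before p and eligible at p ⟺ pvF = some p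
theorem pvFirstHit (u : List (String × Int)) (q : String × Int) (p : Nat)
    (hp : p < (pvRs u).length) :
    ((¬ ∃ j, j < p ∧ pvF u q = some j) ∧ pvCond q ((pvRs u)[p]) = true)
      ↔ pvF u q = some p := by
  constructor
  · rintro ⟨hnot, hcond⟩
    apply List.findIdx?_eq_some_iff_getElem.mpr
    refine ⟨hp, hcond, ?_⟩
    intro j hj
    by_contra hcj
    have hsome : pvF u q ≠ none := by
      intro hnone
      have := List.findIdx?_eq_none_iff.mp hnone ((pvRs u)[j]) (List.getElem_mem _)
      simp [this] at hcj
    obtain ⟨j0, hj0⟩ := Option.ne_none_iff_exists'.mp hsome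
    obtain ⟨hlen0, hc0, hmin0⟩ := List.findIdx?_eq_some_iff_getElem.mp hj0
    have hj0le : j0 ≤ j := by
      by_contra hgt
      exact (hmin0 j (by omega)) hcj
    exact hnot ⟨j0, by omega, hj0⟩
  · intro hF
    obtain ⟨hlen, hc, hmin⟩ := List.findIdx?_eq_some_iff_getElem.mp hF
    constructor
    · rintro ⟨j, hj, hFj⟩
      have : j = p := Option.some.inj (hFj.symm.trans hF)
      omega
    · exact hc

-- A's outer loop: after p raws the mapping holds exactly the UMIs whose first hit is < p
theorem pvOuterA (u : List (String × Int)) (hn : ((pvKs u).map (fun q => q.1)).Nodup) :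
    ∀ p, p ≤ (pvRs u).length →
      ((((pvRs u).take p).foldl
          (fun m rp => (pvKs u).foldl (pvStep rp.1 (PySem.Int.floordiv rp.2 10)) m)
          PySem.Dict.empty).items)
        = (List.range p).flatMap (pvGroup u) := by
  intro p
  induction p with
  | zero => intro _; simp [PySem.Dict.empty]
  | succ p ih =>
    intro hp
    have hplt : p < (pvRs u).length := by omega
    rw [List.take_add_one, List.getElem?_eq_getElem hplt]
    simp only [Option.toList_some, List.foldl_append, List.foldl_cons, List.foldl_nil]
    rw [pvStepItems _ _ _ hn, ih (by omega)]
    rw [List.range_succ, List.flatMap_append]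
    congr 1
    simp only [List.flatMap_cons, List.flatMap_nil, List.append_nil]
    have hraw : ((pvRs u).getD p default).1 = ((pvRs u)[p]).1 := by
      rw [List.getD_eq_getElem?_getD, List.getElem?_eq_getElem hplt]; rfl
    unfold pvGroup
    rw [hraw]
    congr 1
    apply List.filter_congr
    intro q hq
    have hprev : ((((pvRs u).take p).foldl
        (fun m rp => (pvKs u).foldl (pvStep rp.1 (PySem.Int.floordiv rp.2 10)) m)
        PySem.Dict.empty).contains q.1)
        = ((List.range p).flatMap (pvGroup u)).any (fun pr => pr.1 == q.1) := by
      show ((((pvRs u).take p).foldl _ PySem.Dict.empty).items.any (fun pr => pr.1 == q.1)) = _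
      rw [ih (by omega)]
    rw [hprev]
    by_cases hmem : ∃ j, j < p ∧ pvF u q = some j
    · have h1 : (((List.range p).flatMap (pvGroup u)).any (fun pr => pr.1 == q.1)) = true :=
        (pvMemFlat u hn q hq p).mpr hmem
      have h2 : pvF u q ≠ some p := by
        obtain ⟨j, hj, hF⟩ := hmem
        intro hc
        have : j = p := Option.some.inj (hF.symm.trans hc)
        omega
      simp [h1, h2]
    · have h1 : (((List.range p).flatMap (pvGroup u)).any (fun pr => pr.1 == q.1)) = false := by
        rw [← Bool.not_eq_true]
        intro hc
        exact hmem ((pvMemFlat u hn q hq p).mp hc)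
      have h2 : pvCond q ((pvRs u)[p]) = (pvF u q == some p) := by
        by_cases hcond : pvCond q ((pvRs u)[p]) = true
        · have hF : pvF u q = some p := (pvFirstHit u q p hplt).mp ⟨hmem, hcond⟩
          rw [hcond, hF]
          simp
        · have hne : pvF u q ≠ some p := fun hF =>
            hcond ((pvFirstHit u q p hplt).mpr hF).2
          rw [Bool.not_eq_true] at hcond
          rw [hcond]
          exact (beq_eq_false_iff_ne.mpr hne).symm
      rw [h1]
      simp only [Bool.not_false, Bool.true_and]
      exact h2

-- B's buckets dict: bucket j holds exactly the UMIs whose first hit is j, in sorted order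
theorem pvBuckets (u : List (String × Int))
    (hdesc : (pvRs u).Pairwise (fun a b => b.2 ≤ a.2)) (j : Nat) :
    (((pvKs u).foldl (fun b q =>
        match pvFirstTarget q.1 q.2 0 (pvRs u) with
        | some j => b.modify j [] (fun l => l ++ [q.1])
        | none => b) (PySem.Dict.empty : PySem.Dict Nat (List String))).getD j [])
      = ((pvKs u).filter (fun q => pvF u q == some j)).map (fun q => q.1) := by
  have hft : ∀ q : String × Int, pvFirstTarget q.1 q.2 0 (pvRs u) = pvF u q := by
    intro q
    rw [pvFirstTarget_eq q.1 q.2 (pvRs u) hdesc 0]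
    unfold pvF
    cases List.findIdx? (fun r => pvCond q r) (pvRs u) <;> simp
  have hbody : ((pvKs u).foldl (fun b q =>
      match pvFirstTarget q.1 q.2 0 (pvRs u) with
      | some j => b.modify j [] (fun l => l ++ [q.1])
      | none => b) (PySem.Dict.empty : PySem.Dict Nat (List String)))
      = ((pvKs u).foldl (fun b q =>
        ((pvF u q).map (fun (i : Nat) => b.modify i [] (fun s => s ++ [q.1]))).getD b)
        (PySem.Dict.empty : PySem.Dict Nat (List String))) := by
    apply PySem.List.foldl_congr_mem
    intro acc q _
    rw [hft q]
    cases pvF u q <;> rfl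
  rw [hbody, pvBucketFold (pvKs u) (pvF u) PySem.Dict.empty]
  rw [PySem.Dict.getD_foldl_modify_append]
  rw [pvBucketChar (pvKs u) (pvF u) j]
  simp [PySem.Dict.getD_of_not_contains]

-- B's output loop: after p raws its dict holds the same grouped pairs as A's
theorem pvOuterB (u : List (String × Int)) (hn : ((pvKs u).map (fun q => q.1)).Nodup) :
    ∀ p, p ≤ (pvRs u).length →
      (((((pvRs u).zipIdx).take p).foldl (fun o pr =>
          (((pvKs u).filter (fun q => pvF u q == some pr.2)).map (fun q => q.1)).foldl
            (fun o less => o.insert less pr.1.1) o)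
          (PySem.Dict.empty : PySem.Dict String String)).items)
        = (List.range p).flatMap (pvGroup u) := by
  intro p
  induction p with
  | zero => intro _; simp [PySem.Dict.empty]
  | succ p ih =>
    intro hp
    have hplt : p < ((pvRs u).zipIdx).length := by simpa using (by omega : p < (pvRs u).length)
    have hplt' : p < (pvRs u).length := by omega
    rw [List.take_add_one, List.getElem?_eq_getElem hplt]
    simp only [Option.toList_some, List.foldl_append, List.foldl_cons, List.foldl_nil,
      List.getElem_zipIdx, Nat.zero_add]
    set prev := ((((pvRs u).zipIdx).take p).foldl (fun o pr =>
        (((pvKs u).filter (fun q => pvF u q == some pr.2)).map (fun q => q.1)).foldl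
          (fun o less => o.insert less pr.1.1) o)
        (PySem.Dict.empty : PySem.Dict String String)) with hprevdef
    have hitems :
        ((((pvKs u).filter (fun q => pvF u q == some p)).map (fun q => q.1)).foldl
            (fun o less => o.insert less ((pvRs u)[p]).1) prev).items
          = prev.items ++ (((pvKs u).filter (fun q => pvF u q == some p)).map (fun q => q.1)).map
              (fun a => (a, ((pvRs u)[p]).1)) := by
      have := PySem.Dict.items_foldl_insert_fresh
        (l := ((pvKs u).filter (fun q => pvF u q == some p)).map (fun q => q.1))
        (k := fun a => a) (v := fun _ => ((pvRs u)[p]).1) (d := prev)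
        ?_ ?_
      · simpa using this
      · intro a ha
        obtain ⟨q, hq, hqe⟩ := List.mem_map.mp ha
        have hqks : q ∈ pvKs u := List.mem_of_mem_filter hq
        have hF : pvF u q = some p := by simpa using (List.mem_filter.mp hq).2
        have hcont : prev.contains a
            = ((List.range p).flatMap (pvGroup u)).any (fun pr => pr.1 == a) := by
          show (prev.items.any (fun pr => pr.1 == a)) = _
          rw [ih (by omega)]
        rw [← Bool.not_eq_true, hcont, ← hqe]
        intro hc
        obtain ⟨j, hj, hFj⟩ := (pvMemFlat u hn q hqks p).mp hc
        have : j = p := Option.some.inj (hFj.symm.trans hF)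
        omega
      · have hsub : (((pvKs u).filter (fun q => pvF u q == some p)).map (fun q => q.1)).Sublist
            ((pvKs u).map (fun q => q.1)) :=
          List.Sublist.map _ List.filter_sublist
        simpa using hn.sublist hsub
    rw [hitems, ih (by omega)]
    rw [List.range_succ, List.flatMap_append]
    congr 1
    simp only [List.flatMap_cons, List.flatMap_nil, List.append_nil]
    unfold pvGroup
    have hraw : ((pvRs u).getD p default).1 = ((pvRs u)[p]).1 := by
      rw [List.getD_eq_getElem?_getD, List.getElem?_eq_getElem hplt']; rfl
    rw [hraw, List.map_map]
    rfl

theorem pvMain (u : List (String × Int)) (hpre : Pre_correct_umi u) :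
    correct_umi u = correct_umi_alt u := by
  have hperm : (pvKs u).Perm u := PySem.List.sorted_perm u (fun kv => kv.2) false
  have hn : ((pvKs u).map (fun q => q.1)).Nodup :=
    ((hperm.map (fun q => q.1)).symm).nodup hpre.2
  have hasc : (pvKs u).Pairwise (fun a b => a.2 ≤ b.2) :=
    PySem.List.sorted_pairwise u (fun kv => kv.2)
  have hdesc : (pvRs u).Pairwise (fun a b => b.2 ≤ a.2) :=
    PySem.List.sorted_pairwise_rev u (fun kv => kv.2)
  -- A's side
  have hA : correct_umi u = (List.range (pvRs u).length).flatMap (pvGroup u) := by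
    show ((pvRs u).foldl
        (fun m rp => pvInnerA rp.1 (PySem.Int.floordiv rp.2 10) (pvKs u) m)
        PySem.Dict.empty).items = _
    rw [PySem.List.foldl_congr_mem (pvRs u) _
        (fun m rp => (pvKs u).foldl (pvStep rp.1 (PySem.Int.floordiv rp.2 10)) m)
        PySem.Dict.empty
        (fun m rp _ => pvInnerA_eq rp.1 (PySem.Int.floordiv rp.2 10) (pvKs u) hasc m)]
    have := pvOuterA u hn (pvRs u).length (le_refl _)
    rwa [List.take_length] at this
  -- B's side
  have hB : correct_umi_alt u = (List.range (pvRs u).length).flatMap (pvGroup u) := by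
    show (((pvRs u).zipIdx).foldl (fun o p =>
        ((((pvKs u).foldl (fun b q =>
            match pvFirstTarget q.1 q.2 0 (pvRs u) with
            | some j => b.modify j [] (fun l => l ++ [q.1])
            | none => b) (PySem.Dict.empty : PySem.Dict Nat (List String))).getD p.2 []).foldl
          (fun o less => o.insert less p.1.1) o))
        PySem.Dict.empty).items = _
    rw [PySem.List.foldl_congr_mem ((pvRs u).zipIdx) _
        (fun o pr => (((pvKs u).filter (fun q => pvF u q == some pr.2)).map (fun q => q.1)).foldl
            (fun o less => o.insert less pr.1.1) o)
        PySem.Dict.empty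
        (fun o pr _ => by rw [pvBuckets u hdesc pr.2])]
    have := pvOuterB u hn ((pvRs u).zipIdx).length (by simp)
    rw [List.take_length] at this
    simpa using this
  rw [hA, hB]

-- ===== VERDICT (by name: the statement is the Claim_ definition above) =====
theorem correct_umi_spec : Claim_equal_correct_umi := by
  intro u _ hpre
  show correct_umi u = correct_umi_alt u
  exact pvMain u hpre
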